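-- pv_equiv track=rewrite | github.com/cctbx/cctbx_project | cctbx_website/command_line/comment_to_docstring.py | find_module_comment_block
-- ===== SOURCE A (Python) =====
-- from typing import List, Tuple, Optional
--
-- def is_special_comment(line: str) -> bool:
--     """Checks if a line is a special comment (shebang or coding) that should be ignored."""
--     stripped_line = line.strip()
--     if stripped_line.startswith('#!'):
--         return True
--     if 'coding:' in stripped_line:
--         return True
--     return False
--
-- def find_module_comment_block(lines: List[str]) -> Optional[Tuple[str, int, int]]:
--     """Finds the first top-level (unindented) comment block in the file."""
--     first_comment_index = -1
--     for i, line in enumerate(lines):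
--         stripped = line.strip()
--         if stripped.startswith(('class ', 'def ')):
--             break
--         if is_special_comment(line) or not stripped:
--             continue
--         if stripped.startswith('#') and (len(line) - len(line.lstrip(' '))) == 0:
--             if first_comment_index == -1:
--                 first_comment_index = i
--     if first_comment_index == -1:
--         return None
--
--     end_of_block_index = first_comment_index
--     for i in range(first_comment_index + 1, len(lines)):
--         line = lines[i]
--         stripped_line = line.strip()
--         if stripped_line and not stripped_line.startswith('#'):
--             break
--         if stripped_line.startswith('#') and (len(line) - len(line.lstrip(' '))) != 0:
--             break
--         end_of_block_index = i
--
--     content = " ".join([lines[i].strip().lstrip('#').strip() for i in range(first_comment_index, end_of_block_index + 1) if lines[i].strip().startswith('#')])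
--     return content, first_comment_index, end_of_block_index
-- ===== SOURCE B (Python) =====
-- from typing import List, Tuple, Optional
--
-- def is_special_comment(line: str) -> bool:
--     stripped_line = line.strip()
--     if stripped_line.startswith('#!'):
--         return True
--     if 'coding:' in stripped_line:
--         return True
--     return False
--
-- def find_module_comment_block(lines: List[str]) -> Optional[Tuple[str, int, int]]:
--     """Single-pass state machine: 'before block' then 'in block', one scan of lines."""
--     start = None
--     end = 0
--     parts = []
--     for i, line in enumerate(lines):
--         s = line.strip()
--         if start is None:
--             if s.startswith(('class ', 'def ')):
--                 return None
--             if is_special_comment(line) or not s: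
--                 continue
--             if s.startswith('#') and len(line) - len(line.lstrip(' ')) == 0:
--                 start = i
--                 end = i
--                 parts.append(s.lstrip('#').strip())
--         else:
--             if s and not s.startswith('#'):
--                 break
--             if s.startswith('#') and len(line) - len(line.lstrip(' ')) != 0:
--                 break
--             end = i
--             if s.startswith('#'):
--                 parts.append(s.lstrip('#').strip())
--     if start is None:
--         return None
--     return " ".join(parts), start, end
-- ===== Notes on version B (the rewrite author's own statement) =====
-- stated objective: alternative
-- what changed: A scans the file three times (one full pass to find the first top-level comment, a second loop to find the block end, then an index-range comprehension to rebuild the content); B is a single-pass two-state machine over enumerate(lines) that records start/end and accumulates the content pieces as it goes.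
import Mathlib
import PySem

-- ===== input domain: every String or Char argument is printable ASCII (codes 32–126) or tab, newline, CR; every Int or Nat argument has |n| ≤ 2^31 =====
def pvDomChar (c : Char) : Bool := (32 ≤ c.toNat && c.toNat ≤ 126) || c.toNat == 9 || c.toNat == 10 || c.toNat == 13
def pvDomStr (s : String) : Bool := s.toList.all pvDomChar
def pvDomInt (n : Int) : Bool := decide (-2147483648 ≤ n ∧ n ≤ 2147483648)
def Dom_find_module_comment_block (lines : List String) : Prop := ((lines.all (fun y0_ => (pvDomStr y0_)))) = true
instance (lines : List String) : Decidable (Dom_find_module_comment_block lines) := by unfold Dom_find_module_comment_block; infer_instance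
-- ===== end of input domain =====

-- B replaces A's three scans (first-comment search, end-of-block loop, index-range comprehension)
-- by one single-pass two-state machine; alternative decomposition, same asymptotic cost.

-- ===== PORT A =====
-- shared module helper is_special_comment (both Pythons call it)
def is_special_comment (line : String) : Bool :=
  let stripped_line := PySem.Str.strip line
  if PySem.Str.startswith stripped_line "#!" then true
  else if PySem.Str.isIn "coding:" stripped_line then true
  else false

-- len(line) - len(line.lstrip(' ')): lstrip(' ') ported by hand as dropWhile (· == ' '), exact for a one-char strip set
def pyIndent (line : String) : Int :=
  PySem.Str.len line - ((line.toList.dropWhile (fun c => c == ' ')).length : Int)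

-- stripped.lstrip('#').strip(): lstrip('#') ported by hand as dropWhile (· == '#'), exact for a one-char strip set
def pyPiece (stripped : String) : String :=
  PySem.Str.strip (String.ofList (stripped.toList.dropWhile (fun c => c == '#')))

-- A's first loop: for i, line in enumerate(lines) with break on class/def, carrying first_comment_index
def fmcPhase1 : List String → Nat → Int → Int
  | [], _, fci => fci
  | line :: rest, i, fci =>
    let stripped := PySem.Str.strip line
    if PySem.Str.startswith stripped "class " || PySem.Str.startswith stripped "def " then fci
    else if is_special_comment line || stripped == "" then fmcPhase1 rest (i + 1) fci
    else if PySem.Str.startswith stripped "#" && pyIndent line == 0 then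
      fmcPhase1 rest (i + 1) (if fci == -1 then (i : Int) else fci)
    else fmcPhase1 rest (i + 1) fci

-- A's second loop: for i in range(first+1, len(lines)), carrying end_of_block_index
def fmcPhase2 : List String → Nat → Nat → Nat
  | [], _, e => e
  | line :: rest, i, e =>
    let stripped_line := PySem.Str.strip line
    if stripped_line != "" && !(PySem.Str.startswith stripped_line "#") then e
    else if PySem.Str.startswith stripped_line "#" && pyIndent line != 0 then e
    else fmcPhase2 rest (i + 1) i

-- A's tail after first_comment_index is known: second loop + the content comprehension over range(first, end+1)
def fmcFinish (lines : List String) (first : Nat) : Option (String × Int × Int) :=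
  let e := fmcPhase2 (lines.drop (first + 1)) (first + 1) first
  let content := PySem.Str.join " "
    (((PySem.List.pyRange (first : Int) ((e : Int) + 1) 1).filter
        (fun i => PySem.Str.startswith (PySem.Str.strip (PySem.List.pyGetD lines i "")) "#")).map
      (fun i => pyPiece (PySem.Str.strip (PySem.List.pyGetD lines i ""))))
  some (content, (first : Int), (e : Int))

def find_module_comment_block (lines : List String) : Option (String × Int × Int) :=
  let fci := fmcPhase1 lines 0 (-1)
  if fci == -1 then none
  else fmcFinish lines fci.toNat

-- ===== PORT B =====
-- single pass over enumerate(lines); start = None ↔ 'before block' mode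
def fmcAltLoop : List String → Nat → Option Nat → Nat → List String → Option (String × Int × Int)
  | [], _, start, e, parts =>
    match start with
    | none => none
    | some s0 => some (PySem.Str.join " " parts, (s0 : Int), (e : Int))
  | line :: rest, i, start, e, parts =>
    let s := PySem.Str.strip line
    match start with
    | none =>
      if PySem.Str.startswith s "class " || PySem.Str.startswith s "def " then none
      else if is_special_comment line || s == "" then fmcAltLoop rest (i + 1) none e parts
      else if PySem.Str.startswith s "#" && pyIndent line == 0 then
        fmcAltLoop rest (i + 1) (some i) i (parts ++ [pyPiece s])
      else fmcAltLoop rest (i + 1) none e parts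
    | some s0 =>
      if s != "" && !(PySem.Str.startswith s "#") then
        some (PySem.Str.join " " parts, (s0 : Int), (e : Int))
      else if PySem.Str.startswith s "#" && pyIndent line != 0 then
        some (PySem.Str.join " " parts, (s0 : Int), (e : Int))
      else fmcAltLoop rest (i + 1) (some s0) i
        (parts ++ (if PySem.Str.startswith s "#" then [pyPiece s] else []))

def find_module_comment_block_alt (lines : List String) : Option (String × Int × Int) :=
  fmcAltLoop lines 0 none 0 []

-- ===== PRECONDITION & SPEC =====
def Spec_find_module_comment_block (lines : List String) (out : Option (String × Int × Int)) : Prop := out = find_module_comment_block_alt lines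
instance (lines : List String) (out : Option (String × Int × Int)) : Decidable (Spec_find_module_comment_block lines out) := by unfold Spec_find_module_comment_block; infer_instance

-- ===== CLAIM (what is proved, stated in full; the proofs are below) =====
def Claim_equal_find_module_comment_block : Prop := ∀ (lines : List String), Dom_find_module_comment_block lines → Spec_find_module_comment_block lines (find_module_comment_block lines)

-- ===== LEMMAS AND PROOFS =====

-- the pieces B's in-block mode appends, read off the suffix alone
def fmcCollect : List String → List String
  | [] => []
  | line :: rest =>
    let s := PySem.Str.strip line
    if s != "" && !(PySem.Str.startswith s "#") then []
    else if PySem.Str.startswith s "#" && pyIndent line != 0 then []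
    else (if PySem.Str.startswith s "#" then [pyPiece s] else []) ++ fmcCollect rest

theorem fmcPhase1_stable (rest : List String) (i : Nat) (fci : Int) (h : fci ≠ -1) :
    fmcPhase1 rest i fci = fci := by
  induction rest generalizing i with
  | nil => rfl
  | cons l r ih =>
    simp only [fmcPhase1]
    split_ifs with h1 h2 h3 h4
    · rfl
    · exact ih (i + 1)
    · exact absurd (by simpa using h4) h
    · exact ih (i + 1)
    · exact ih (i + 1)

theorem fmcPhase2_ge (rest : List String) (i e : Nat) :
    fmcPhase2 rest i e = e ∨ i ≤ fmcPhase2 rest i e := by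
  induction rest generalizing i e with
  | nil => left; rfl
  | cons l r ih =>
    simp only [fmcPhase2]
    split_ifs
    · left; rfl
    · left; rfl
    · rcases ih (i + 1) i with h | h
      · right; omega
      · right; omega

theorem fmcAltLoop_inBlock (rest : List String) (i s0 e : Nat) (parts : List String) :
    fmcAltLoop rest i (some s0) e parts =
      some (PySem.Str.join " " (parts ++ fmcCollect rest), (s0 : Int),
        ((fmcPhase2 rest i e : Nat) : Int)) := by
  induction rest generalizing i e parts with
  | nil => simp [fmcAltLoop, fmcCollect, fmcPhase2]
  | cons l r ih =>
    simp only [fmcAltLoop, fmcCollect, fmcPhase2]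
    split_ifs with h1 h2 h3
    · simp
    · simp
    · rw [ih]; simp [List.append_assoc]
    · rw [ih]; simp [List.append_assoc]

theorem fmcGetD_of_drop (lines : List String) (i : Nat) (l : String) (rest : List String)
    (h : lines.drop i = l :: rest) : PySem.List.pyGetD lines (i : Int) "" = l := by
  have h1 : (lines.drop i)[0]? = lines[i + 0]? := List.getElem?_drop
  rw [h] at h1
  have h0 : lines[i]? = some l := by simpa using h1.symm
  simp [PySem.List.pyGetD_natCast, List.getD_eq_getElem?_getD, h0]

theorem fmcDrop_succ (lines : List String) (i : Nat) (l : String) (rest : List String)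
    (h : lines.drop i = l :: rest) : lines.drop (i + 1) = rest := by
  have h1 : lines.drop (i + 1) = (lines.drop i).drop 1 := by rw [List.drop_drop]
  rw [h1, h, List.drop_succ_cons, List.drop_zero]

theorem fmcRange_collect (lines : List String) (rest : List String) (i e : Nat)
    (hd : lines.drop i = rest) (he : e < i) :
    ((PySem.List.pyRange (i : Int) (((fmcPhase2 rest i e : Nat) : Int) + 1) 1).filter
        (fun j => PySem.Str.startswith (PySem.Str.strip (PySem.List.pyGetD lines j "")) "#")).map
      (fun j => pyPiece (PySem.Str.strip (PySem.List.pyGetD lines j ""))) = fmcCollect rest := by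
  induction rest generalizing i e with
  | nil =>
    rw [show fmcPhase2 [] i e = e from rfl,
      PySem.List.pyRange_one_eq_nil (by omega)]
    rfl
  | cons l r ih =>
    have hl := fmcGetD_of_drop lines i l r hd
    have hd' := fmcDrop_succ lines i l r hd
    simp only [fmcPhase2, fmcCollect]
    split_ifs with h1 h2 h3
    · rw [PySem.List.pyRange_one_eq_nil (by omega)]; rfl
    · rw [PySem.List.pyRange_one_eq_nil (by omega)]; rfl
    · have hge : i ≤ fmcPhase2 r (i + 1) i := by
        rcases fmcPhase2_ge r (i + 1) i with h | h <;> omega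
      have key := ih (i + 1) i hd' (by omega)
      rw [show ((i + 1 : Nat) : Int) = (i : Int) + 1 by omega] at key
      rw [PySem.List.pyRange_one_cons (by omega)]
      simp only [List.filter_cons, hl]
      simp only [pysem] at h3 key hl ⊢
      rw [show "#".toList = ['#'] from rfl] at h3 key
      rw [List.getD_eq_getElem?_getD] at hl
      simp [h3, key, hl]
    · have hge : i ≤ fmcPhase2 r (i + 1) i := by
        rcases fmcPhase2_ge r (i + 1) i with h | h <;> omega
      have key := ih (i + 1) i hd' (by omega)
      rw [show ((i + 1 : Nat) : Int) = (i : Int) + 1 by omega] at key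
      rw [PySem.List.pyRange_one_cons (by omega)]
      simp only [List.filter_cons, hl]
      simp only [pysem] at h3 key hl ⊢
      rw [show "#".toList = ['#'] from rfl] at h3 key
      rw [List.getD_eq_getElem?_getD] at hl
      simp [h3, key]

theorem fmcMain (rest : List String) (lines : List String) (i : Nat)
    (hd : lines.drop i = rest) :
    fmcAltLoop rest i none 0 [] =
      (if fmcPhase1 rest i (-1) == -1 then none
       else fmcFinish lines (fmcPhase1 rest i (-1)).toNat) := by
  induction rest generalizing i with
  | nil => rfl
  | cons l r ih =>
    have hd' := fmcDrop_succ lines i l r hd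
    have hl := fmcGetD_of_drop lines i l r hd
    by_cases h1 : (PySem.Str.startswith (PySem.Str.strip l) "class "
        || PySem.Str.startswith (PySem.Str.strip l) "def ") = true
    · have e1 : fmcAltLoop (l :: r) i none 0 [] = none := by
        simp only [fmcAltLoop, h1, if_true]
      have e2 : fmcPhase1 (l :: r) i (-1) = -1 := by
        simp only [fmcPhase1, h1, if_true]
      rw [e1, e2]; rfl
    · by_cases h2 : (is_special_comment l || PySem.Str.strip l == "") = true
      · have e1 : fmcAltLoop (l :: r) i none 0 [] = fmcAltLoop r (i + 1) none 0 [] := by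
          simp only [fmcAltLoop, h1, h2, Bool.false_eq_true, if_false, if_true]
        have e2 : fmcPhase1 (l :: r) i (-1) = fmcPhase1 r (i + 1) (-1) := by
          simp only [fmcPhase1, h1, h2, Bool.false_eq_true, if_false, if_true]
        rw [e1, e2]; exact ih (i + 1) hd'
      · by_cases h3 : (PySem.Str.startswith (PySem.Str.strip l) "#" && pyIndent l == 0) = true
        · -- first top-level comment found at index i
          have e1 : fmcAltLoop (l :: r) i none 0 []
              = fmcAltLoop r (i + 1) (some i) i ([] ++ [pyPiece (PySem.Str.strip l)]) := by
            simp only [fmcAltLoop, h1, h2, h3, Bool.false_eq_true, if_false, if_true]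
          have e2 : fmcPhase1 (l :: r) i (-1) = (i : Int) := by
            have : fmcPhase1 (l :: r) i (-1) = fmcPhase1 r (i + 1) (i : Int) := by
              simp only [fmcPhase1, h1, h2, h3, Bool.false_eq_true, if_false, if_true]
              norm_num
            rw [this]; exact fmcPhase1_stable r (i + 1) (i : Int) (by omega)
          have hne : (((i : Int)) == -1) = false := by rw [beq_eq_false_iff_ne]; omega
          rw [e1, e2, hne, fmcAltLoop_inBlock]
          simp only [Bool.false_eq_true, if_false, Int.toNat_natCast]
          have hs : PySem.Str.startswith (PySem.Str.strip l) "#" = true := by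
            simp only [Bool.and_eq_true] at h3; exact h3.1
          have key := fmcRange_collect lines r (i + 1) i hd' (by omega)
          rw [show ((i + 1 : Nat) : Int) = (i : Int) + 1 by omega] at key
          simp only [fmcFinish, hd']
          rw [PySem.List.pyRange_one_cons (by
            have := fmcPhase2_ge r (i + 1) i
            rcases this with h | h <;> omega)]
          simp only [List.filter_cons, hl]
          simp only [pysem] at hs key hl ⊢
          rw [show "#".toList = ['#'] from rfl] at hs key
          rw [List.getD_eq_getElem?_getD] at hl
          simp [hs, key, hl]
        · have e1 : fmcAltLoop (l :: r) i none 0 [] = fmcAltLoop r (i + 1) none 0 [] := by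
            simp only [fmcAltLoop, h1, h2, h3, Bool.false_eq_true, if_false]
          have e2 : fmcPhase1 (l :: r) i (-1) = fmcPhase1 r (i + 1) (-1) := by
            simp only [fmcPhase1, h1, h2, h3, Bool.false_eq_true, if_false]
          rw [e1, e2]; exact ih (i + 1) hd'

-- ===== VERDICT (by name: the statement is the Claim_ definition above) =====
theorem find_module_comment_block_spec : Claim_equal_find_module_comment_block := by
  intro lines _
  unfold Spec_find_module_comment_block find_module_comment_block find_module_comment_block_alt
  exact (fmcMain lines lines 0 rfl).symm
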